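-- pv_equiv track=rewrite | github.com/r-oleg-official/intro_python | seminar-05/task-04_rle_pack/src/unpack_rle.py | unpack_not_num
-- ===== SOURCE A (Python) =====
-- def unpack_not_num(li: list) -> list:
--     li_res = []
--     for item in li:
--         line = ""
--         digit = ""
--         ind = 0
--         for i in range(1, len(item)):
--             if item[i].isdigit():
--                 digit += item[i]
--             if not item[i].isdigit():
--                 line += item[ind] * int(digit)
--                 digit = ""
--                 ind = i
--         li_res.append(line + "\n")
--     return li_res
-- ===== SOURCE B (Python) =====
-- def unpack_not_num(li: list) -> list:
--     li_res = []
--     for item in li: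
--         bounds = [0] + [i for i in range(1, len(item)) if not item[i].isdigit()]
--         parts = [item[p] * int(item[p + 1:q]) for p, q in zip(bounds, bounds[1:])]
--         li_res.append("".join(parts) + "\n")
--     return li_res
-- ===== Notes on version B (the rewrite author's own statement) =====
-- stated objective: alternative
-- what changed: Replaced A's single stateful scan (char/digit accumulators and a running anchor index) by first collecting the list of non-digit boundary indices and then mapping item[p]*int(item[p+1:q]) over consecutive boundary pairs.
import Mathlib
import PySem

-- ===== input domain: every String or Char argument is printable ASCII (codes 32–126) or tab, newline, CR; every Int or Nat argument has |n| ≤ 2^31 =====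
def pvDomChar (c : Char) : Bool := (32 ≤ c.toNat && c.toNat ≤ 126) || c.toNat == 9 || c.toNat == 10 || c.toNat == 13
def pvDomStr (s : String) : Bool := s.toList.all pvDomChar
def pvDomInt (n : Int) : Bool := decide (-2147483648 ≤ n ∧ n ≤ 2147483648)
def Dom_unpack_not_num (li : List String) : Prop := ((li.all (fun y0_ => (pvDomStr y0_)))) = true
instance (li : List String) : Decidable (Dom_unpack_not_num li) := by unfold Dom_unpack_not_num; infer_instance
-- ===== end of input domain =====

-- B unpacks each line by collecting boundary indices and mapping over consecutive boundary pairs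
-- instead of A's single scan with char/digit accumulator state (objective: alternative decomposition).

-- ===== PORT A =====
-- Python's int('') raises ValueError; Pre_ excludes those inputs, so the `.getD 0` after
-- `ofChars?` is unreachable inside Pre_.
def pvStepA (s : List Char) (st : List Char × List Char × Int) (i : Int) : List Char × List Char × Int :=
  let c := (PySem.List.pyGet? s i).getD ' '
  let digit := if PySem.Chars.isdigit c then st.2.1 ++ [c] else st.2.1
  if ¬ PySem.Chars.isdigit c then
    (st.1 ++ List.replicate ((PySem.Int.ofChars? digit).getD 0).toNat ((PySem.List.pyGet? s st.2.2).getD ' '),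
     [], i)
  else (st.1, digit, st.2.2)

def pvItemA (s : List Char) : List Char :=
  ((PySem.List.pyRange 1 s.length).foldl (pvStepA s) ([], [], 0)).1 ++ ['\n']

def unpack_not_num (li : List String) : List String :=
  li.foldl (fun res item => res ++ [String.mk (pvItemA item.toList)]) []

-- ===== PORT B =====
-- item[p] * int(item[p+1:q]) for a consecutive boundary pair (p, q)
def pvPart (s : List Char) (pq : Int × Int) : List Char :=
  List.replicate ((PySem.Int.ofChars? (PySem.List.slice s (some (pq.1 + 1)) (some pq.2))).getD 0).toNat
    ((PySem.List.pyGet? s pq.1).getD ' ')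

def pvItemB (s : List Char) : List Char :=
  let bounds : List Int :=
    0 :: (PySem.List.pyRange 1 s.length).filter
      (fun i => !(PySem.Chars.isdigit ((PySem.List.pyGet? s i).getD ' ')))
  let parts := (bounds.zip bounds.tail).map (pvPart s)
  PySem.Chars.join [] parts ++ ['\n']

def unpack_not_num_alt (li : List String) : List String :=
  li.foldl (fun res item => res ++ [String.mk (pvItemB item.toList)]) []

-- ===== PRECONDITION & SPEC =====
-- Pre_ excludes exactly the inputs on which the Python A raises ValueError (int('') at a
-- non-digit character not immediately preceded by a digit); Python B raises there too.
def pvOkItem (s : List Char) : Prop :=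
  ∀ i ∈ List.range s.length, 1 ≤ i → PySem.Chars.isdigit (s.getD i ' ') = false →
    2 ≤ i ∧ PySem.Chars.isdigit (s.getD (i - 1) ' ') = true

def Pre_unpack_not_num (li : List String) : Prop := ∀ s ∈ li, pvOkItem s.toList
instance (li : List String) : Decidable (Pre_unpack_not_num li) := by
  unfold Pre_unpack_not_num pvOkItem; infer_instance

def pvWitness_unpack_not_num : List String := ["a3", "x12y4!2", ""]

def Spec_unpack_not_num (li : List String) (out : List String) : Prop := out = unpack_not_num_alt li
instance (li : List String) (out : List String) : Decidable (Spec_unpack_not_num li out) := by unfold Spec_unpack_not_num; infer_instance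

-- ===== CLAIM (what is proved, stated in full; the proofs are below) =====
def Claim_equal_unpack_not_num : Prop := ∀ (li : List String), Dom_unpack_not_num li → Pre_unpack_not_num li → Spec_unpack_not_num li (unpack_not_num li)

-- ===== LEMMAS AND PROOFS =====

-- the common segment decomposition: pvG s ind r walks the remaining indices r; at each
-- non-digit boundary i it emits s[ind] repeated int(s[ind+1:i]) times and moves the anchor to i
def pvG (s : List Char) : Int → List Int → List Char
  | _, [] => []
  | ind, i :: r =>
    if PySem.Chars.isdigit ((PySem.List.pyGet? s i).getD ' ') then pvG s ind r
    else pvPart s (ind, i) ++ pvG s i r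

lemma pvJoinNil (ps : List (List Char)) : PySem.Chars.join [] ps = ps.flatten := by
  induction ps with
  | nil => simp [PySem.Chars.join_nil]
  | cons p ps ih =>
    cases ps with
    | nil => simp [PySem.Chars.join_singleton]
    | cons q qs => simpa [PySem.Chars.join_cons_cons] using ih

lemma pvB_zip (s : List Char) (r : List Int) (ind : Int) :
    (((ind :: r.filter (fun i => !(PySem.Chars.isdigit ((PySem.List.pyGet? s i).getD ' ')))).zip
        (r.filter (fun i => !(PySem.Chars.isdigit ((PySem.List.pyGet? s i).getD ' '))))).map
          (pvPart s)).flatten = pvG s ind r := by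
  induction r generalizing ind with
  | nil => simp [pvG]
  | cons i r ih =>
    by_cases h : PySem.Chars.isdigit ((PySem.List.pyGet? s i).getD ' ')
    · have hf : (i :: r).filter (fun i => !(PySem.Chars.isdigit ((PySem.List.pyGet? s i).getD ' ')))
          = r.filter (fun i => !(PySem.Chars.isdigit ((PySem.List.pyGet? s i).getD ' '))) := by
        simp [h]
      rw [hf, ih ind]
      simp [pvG, h]
    · have hf : (i :: r).filter (fun i => !(PySem.Chars.isdigit ((PySem.List.pyGet? s i).getD ' ')))
          = i :: r.filter (fun i => !(PySem.Chars.isdigit ((PySem.List.pyGet? s i).getD ' '))) := by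
        simp [h]
      rw [hf, List.zip_cons_cons, List.map_cons, List.flatten_cons, ih i]
      simp [pvG, h]

lemma pvA_loop (s : List Char) (m : Nat) : ∀ (k ind : Nat) (line : List Char),
    ind + 1 ≤ k → k + m ≤ s.length →
    ((PySem.List.pyRange (k : Int) ((k : Int) + (m : Int))).foldl (pvStepA s)
        (line, PySem.List.slice s (some ((ind : Int) + 1)) (some (k : Int)), (ind : Int))).1
      = line ++ pvG s (ind : Int) (PySem.List.pyRange (k : Int) ((k : Int) + (m : Int))) := by
  induction m with
  | zero =>
    intro k ind line _ _
    simp [PySem.List.pyRange, pvG]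
  | succ m ih =>
    intro k ind line hik hkm
    have hklt : (k : Int) < (k : Int) + ((m + 1 : Nat) : Int) := by push_cast; omega
    rw [PySem.List.pyRange_one_cons hklt]
    have hkn : k < s.length := by omega
    have hget : PySem.List.pyGet? s (k : Int) = some s[k] := by
      rw [PySem.List.pyGet?_natCast, List.getElem?_eq_getElem hkn]
    have hc1 : ((k : Int) + 1) = ((k + 1 : Nat) : Int) := by push_cast; ring
    have hc2 : ((k : Int) + ((m + 1 : Nat) : Int)) = ((k + 1 : Nat) : Int) + (m : Nat) := by
      push_cast; ring
    have hind1 : ((ind : Int) + 1) = ((ind + 1 : Nat) : Int) := by push_cast; ring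
    have hsl : PySem.List.slice s (some ((ind : Int) + 1)) (some (k : Int))
        = (s.drop (ind + 1)).take (k - (ind + 1)) := by
      rw [hind1, PySem.List.slice_natCast]
    by_cases hd : PySem.Chars.isdigit s[k]
    · -- digit character: accumulate, slice grows by one
      have hsl' : PySem.List.slice s (some ((ind : Int) + 1)) (some (k : Int)) ++ [s[k]]
          = PySem.List.slice s (some ((ind : Int) + 1)) (some ((k + 1 : Nat) : Int)) := by
        rw [hind1, PySem.List.slice_natCast, PySem.List.slice_natCast]
        have : k + 1 - (ind + 1) = (k - (ind + 1)) + 1 := by omega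
        rw [this, List.take_succ, List.getElem?_drop]
        have : ind + 1 + (k - (ind + 1)) = k := by omega
        rw [this, List.getElem?_eq_getElem hkn]
        rfl
      rw [List.foldl_cons]
      have hstep : pvStepA s (line, PySem.List.slice s (some ((ind : Int) + 1)) (some (k : Int)), (ind : Int)) (k : Int)
          = (line, PySem.List.slice s (some ((ind : Int) + 1)) (some ((k + 1 : Nat) : Int)), (ind : Int)) := by
        simp only [pvStepA, hget, Option.getD_some, hd, if_pos, not_true, if_neg, ite_true,
          not_true_eq_false, if_false]
        rw [← hsl']
      rw [hstep]
      have hG : pvG s (ind : Int) ((k : Int) :: PySem.List.pyRange ((k : Int) + 1) ((k : Int) + ((m + 1 : Nat) : Int)))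
          = pvG s (ind : Int) (PySem.List.pyRange ((k : Int) + 1) ((k : Int) + ((m + 1 : Nat) : Int))) := by
        simp [pvG, hget, hd]
      rw [hG, hc1, hc2]
      exact ih (k + 1) ind line (by omega) (by omega)
    · -- boundary character: emit a part, reset the anchor to k
      rw [List.foldl_cons]
      have hstep : pvStepA s (line, PySem.List.slice s (some ((ind : Int) + 1)) (some (k : Int)), (ind : Int)) (k : Int)
          = (line ++ pvPart s ((ind : Int), (k : Int)),
             PySem.List.slice s (some ((k : Int) + 1)) (some ((k + 1 : Nat) : Int)), (k : Int)) := by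
        have hsl0 : PySem.List.slice s (some ((k : Int) + 1)) (some ((k + 1 : Nat) : Int))
            = ([] : List Char) := by
          rw [hc1, PySem.List.slice_natCast]; simp
        simp only [pvStepA, hget, Option.getD_some, hd, if_neg, not_false_eq_true, if_pos, ite_false,
          not_false_iff, if_true, hsl0]
        rfl
      rw [hstep]
      have hG : pvG s (ind : Int) ((k : Int) :: PySem.List.pyRange ((k : Int) + 1) ((k : Int) + ((m + 1 : Nat) : Int)))
          = pvPart s ((ind : Int), (k : Int)) ++ pvG s (k : Int) (PySem.List.pyRange ((k : Int) + 1) ((k : Int) + ((m + 1 : Nat) : Int))) := by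
        simp [pvG, hget, hd]
      rw [hG, hc1, hc2, ← List.append_assoc]
      exact ih (k + 1) k (line ++ pvPart s ((ind : Int), (k : Int))) (by omega) (by omega)

lemma pvItem_eq (s : List Char) : pvItemA s = pvItemB s := by
  unfold pvItemA pvItemB
  simp only [List.tail_cons]
  rw [pvJoinNil, pvB_zip]
  cases hn : s.length with
  | zero =>
    have he : PySem.List.pyRange 1 ((0 : Nat) : Int) = [] := by decide
    simp [hn, he, pvG]
  | succ n =>
    have := pvA_loop s n 1 0 [] (by omega) (by omega)
    have e1 : (((1 : Nat) : Int) + ((n : Nat) : Int)) = (((n + 1 : Nat)) : Int) := by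
      push_cast; ring
    have e2 : PySem.List.slice s (some (((0 : Nat) : Int) + 1)) (some ((1 : Nat) : Int))
        = ([] : List Char) := by
      have h01 : (((0 : Nat) : Int) + 1) = ((1 : Nat) : Int) := by norm_num
      rw [h01, PySem.List.slice_natCast]
      simp
    rw [e1, e2] at this
    simp only [Nat.cast_one, Nat.cast_zero, List.nil_append] at this
    rw [this]

-- ===== VERDICT (by name: the statement is the Claim_ definition above) =====
theorem unpack_not_num_spec : Claim_equal_unpack_not_num := by
  intro li _ _
  unfold Spec_unpack_not_num unpack_not_num unpack_not_num_alt
  simp only [PySem.List.foldl_append_singleton_eq_map]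
  exact List.map_congr_left (fun item _ => by rw [pvItem_eq])
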